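-- pv_equiv track=rewrite | github.com/venkatmiriyala19/CodingNinjas | XOR Query.py | xorQuery
-- ===== SOURCE A (Python) =====
-- def xorQuery(queries):
--     a=[]
--     xor=0
--     for i in queries:
--         if i[0]==1:
--             a.append(i[1]^xor)
--         else:
--             xor=xor^i[1]
--     for i in range(len(a)):
--         a[i]=a[i]^xor
--     return a
--     # Write your code here.
--     pass
-- ===== SOURCE B (Python) =====
-- def xorQuery(queries):
--     total = 0
--     for t, v in queries:
--         if t != 1:
--             total ^= v
--     out = []
--     for t, v in queries:
--         if t == 1:
--             out.append(v ^ total)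
--         else:
--             total ^= v
--     return out
-- ===== Notes on version B (the rewrite author's own statement) =====
-- stated objective: alternative
-- what changed: Replaces A's store-then-correct scheme (first pass stores prefix-xored values in a list, second pass rewrites every stored value with the final xor) by precomputing the total xor of all type-2 values and then one forward walk that peels type-2 values off that total, emitting each type-1 answer directly with no correction pass.
import Mathlib
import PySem

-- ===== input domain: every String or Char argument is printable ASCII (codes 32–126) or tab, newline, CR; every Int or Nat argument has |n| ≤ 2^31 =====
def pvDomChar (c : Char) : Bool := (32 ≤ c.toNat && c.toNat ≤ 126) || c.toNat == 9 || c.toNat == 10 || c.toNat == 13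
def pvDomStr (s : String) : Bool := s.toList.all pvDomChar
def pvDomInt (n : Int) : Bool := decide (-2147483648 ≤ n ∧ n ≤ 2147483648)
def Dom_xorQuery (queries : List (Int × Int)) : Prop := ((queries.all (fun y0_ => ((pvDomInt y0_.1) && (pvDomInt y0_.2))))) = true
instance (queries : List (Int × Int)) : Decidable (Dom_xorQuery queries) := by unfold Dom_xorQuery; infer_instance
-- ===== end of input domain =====

-- B precomputes the total xor of type-2 values, then one forward walk emits each answer directly (no store-then-correct pass); alternative decomposition, same cost.


-- ===== PORT A =====
-- literal transliteration of A: first loop folds (a, xor) over the queries;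
-- the second loop 'for i in range(len(a)): a[i] = a[i]^xor' is the in-place map below.
def xorQuery (queries : List (Int × Int)) : List Int :=
  let st := queries.foldl
    (fun (s : List Int × Int) (i : Int × Int) =>
      if i.1 == 1 then (s.1 ++ [PySem.Int.bxor i.2 s.2], s.2)
      else (s.1, PySem.Int.bxor s.2 i.2)) ([], 0)
  st.1.map (fun x => PySem.Int.bxor x st.2)

-- ===== PORT B =====
-- transliteration of B's first loop: 'total ^= v' for every non-type-1 query, accumulator threaded
def pvTotal2 : List (Int × Int) → Int → Int
  | [], total => total
  | (t, v) :: rest, total =>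
      pvTotal2 rest (if t == 1 then total else PySem.Int.bxor total v)

-- transliteration of B's second loop: emit 'v ^ total' for type-1, else 'total ^= v'
def pvWalk : Int → List (Int × Int) → List Int
  | _, [] => []
  | total, (t, v) :: rest =>
      if t == 1 then PySem.Int.bxor v total :: pvWalk total rest
      else pvWalk (PySem.Int.bxor total v) rest

def xorQuery_alt (queries : List (Int × Int)) : List Int :=
  pvWalk (pvTotal2 queries 0) queries

-- ===== PRECONDITION & SPEC =====
def Spec_xorQuery (queries : List (Int × Int)) (out : List Int) : Prop := out = xorQuery_alt queries
instance (queries : List (Int × Int)) (out : List Int) : Decidable (Spec_xorQuery queries out) := by unfold Spec_xorQuery; infer_instance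

-- ===== CLAIM (what is proved, stated in full; the proofs are below) =====
def Claim_equal_xorQuery : Prop := ∀ (queries : List (Int × Int)), Dom_xorQuery queries → Spec_xorQuery queries (xorQuery queries)

-- ===== LEMMAS AND PROOFS =====

-- two's-complement encoding used to prove associativity of bxor
def pvSgn (a : Int) : Bool := decide (a < 0)
def pvPat (a : Int) : Nat := if 0 ≤ a then a.toNat else (-a - 1).toNat
def pvDec (s : Bool) (n : Nat) : Int := if s then -(n : Int) - 1 else (n : Int)

theorem bxor_enc (a b : Int) :
    PySem.Int.bxor a b = pvDec (xor (pvSgn a) (pvSgn b)) (pvPat a ^^^ pvPat b) := by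
  simp only [PySem.Int.bxor, pvDec, pvSgn, pvPat]
  by_cases ha : 0 ≤ a <;> by_cases hb : 0 ≤ b <;>
    simp [ha, hb] <;>
    omega

theorem sgn_dec (s : Bool) (n : Nat) : pvSgn (pvDec s n) = s := by
  cases s <;> simp [pvSgn, pvDec] <;> omega

theorem pat_dec (s : Bool) (n : Nat) : pvPat (pvDec s n) = n := by
  cases s <;> simp [pvPat, pvDec] <;> omega

theorem bxor_assoc (a b c : Int) :
    PySem.Int.bxor (PySem.Int.bxor a b) c = PySem.Int.bxor a (PySem.Int.bxor b c) := by
  rw [bxor_enc a b, bxor_enc b c, bxor_enc (pvDec _ _) c, bxor_enc a (pvDec _ _)]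
  rw [sgn_dec, pat_dec, sgn_dec, pat_dec, Bool.xor_assoc, Nat.xor_assoc]

theorem bxor_zero_left (a : Int) : PySem.Int.bxor 0 a = a := by
  rw [PySem.Int.bxor_comm, PySem.Int.bxor_zero]

theorem bxor_cancel (v x t : Int) :
    PySem.Int.bxor (PySem.Int.bxor v x) (PySem.Int.bxor x t) = PySem.Int.bxor v t := by
  rw [bxor_assoc, ← bxor_assoc x x t, PySem.Int.bxor_self, bxor_zero_left]

-- total xor of all type-2 values, and the intended output (reference characterisations)
def pvTot : List (Int × Int) → Int
  | [] => 0
  | q :: qs => if q.1 = 1 then pvTot qs else PySem.Int.bxor q.2 (pvTot qs)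

def pvSpec2 : List (Int × Int) → Int → List Int
  | [], _ => []
  | q :: qs, x0 =>
      if q.1 = 1 then PySem.Int.bxor q.2 (PySem.Int.bxor x0 (pvTot qs)) :: pvSpec2 qs x0
      else pvSpec2 qs x0

theorem lemA (qs : List (Int × Int)) (a0 : List Int) (x0 : Int) :
    (qs.foldl (fun (s : List Int × Int) (i : Int × Int) =>
        if i.1 == 1 then (s.1 ++ [PySem.Int.bxor i.2 s.2], s.2)
        else (s.1, PySem.Int.bxor s.2 i.2)) (a0, x0)).2 = PySem.Int.bxor x0 (pvTot qs)
    ∧ (qs.foldl (fun (s : List Int × Int) (i : Int × Int) =>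
        if i.1 == 1 then (s.1 ++ [PySem.Int.bxor i.2 s.2], s.2)
        else (s.1, PySem.Int.bxor s.2 i.2)) (a0, x0)).1.map
          (fun e => PySem.Int.bxor e (PySem.Int.bxor x0 (pvTot qs)))
      = a0.map (fun e => PySem.Int.bxor e (PySem.Int.bxor x0 (pvTot qs))) ++ pvSpec2 qs 0 := by
  induction qs generalizing a0 x0 with
  | nil => simp [pvTot, pvSpec2, PySem.Int.bxor_zero]
  | cons q qs ih =>
    by_cases h : q.1 = 1
    · have H := ih (a0 ++ [PySem.Int.bxor q.2 x0]) x0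
      have hb : (q.1 == 1) = true := by simp [h]
      rw [List.foldl_cons, if_pos hb]
      refine ⟨?_, ?_⟩
      · rw [H.1]
        simp [pvTot, h]
      · simp only [pvSpec2, pvTot, if_pos h]
        rw [H.2, List.map_append]
        simp [bxor_cancel, bxor_zero_left, List.append_assoc]
    · have hb : (q.1 == 1) = false := by simp [h]
      have H := ih a0 (PySem.Int.bxor x0 q.2)
      rw [List.foldl_cons, if_neg (by simp [hb])]
      have hx : PySem.Int.bxor (PySem.Int.bxor x0 q.2) (pvTot qs)
          = PySem.Int.bxor x0 (PySem.Int.bxor q.2 (pvTot qs)) := bxor_assoc _ _ _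
      rw [hx] at H
      simpa [pvTot, pvSpec2, h] using H

theorem lemTotal2 (qs : List (Int × Int)) (t : Int) :
    pvTotal2 qs t = PySem.Int.bxor t (pvTot qs) := by
  induction qs generalizing t with
  | nil => simp [pvTotal2, pvTot, PySem.Int.bxor_zero]
  | cons q qs ih =>
    obtain ⟨a, v⟩ := q
    by_cases h : a = 1
    · simp [pvTotal2, pvTot, h, ih]
    · simp only [pvTotal2, pvTot, h, beq_iff_eq, if_false]
      rw [ih, bxor_assoc]

theorem lemWalk (qs : List (Int × Int)) (x0 : Int) :
    pvWalk (PySem.Int.bxor x0 (pvTot qs)) qs = pvSpec2 qs x0 := by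
  induction qs generalizing x0 with
  | nil => simp [pvWalk, pvSpec2]
  | cons q qs ih =>
    obtain ⟨a, v⟩ := q
    by_cases h : a = 1
    · simp [pvWalk, pvSpec2, pvTot, h, ih]
    · have hstep : PySem.Int.bxor (PySem.Int.bxor x0 (pvTot ((a, v) :: qs))) v
          = PySem.Int.bxor x0 (pvTot qs) := by
        simp only [pvTot, h, if_false]
        rw [bxor_assoc]
        congr 1
        rw [PySem.Int.bxor_comm v (pvTot qs), bxor_assoc,
          PySem.Int.bxor_self, PySem.Int.bxor_zero]
      simp only [pvWalk, pvSpec2, h, beq_iff_eq, if_false, hstep, ih]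

-- ===== VERDICT (by name: the statement is the Claim_ definition above) =====
theorem xorQuery_spec : Claim_equal_xorQuery := by
  intro queries _
  unfold Spec_xorQuery xorQuery xorQuery_alt
  have hw : pvWalk (pvTotal2 queries 0) queries = pvSpec2 queries 0 := by
    rw [lemTotal2, bxor_zero_left]
    have h := lemWalk queries 0
    rwa [bxor_zero_left] at h
  rw [hw]
  obtain ⟨h1, h2⟩ := lemA queries [] 0
  simp only [List.map_nil, List.nil_append] at h2
  simp only []
  rw [h1]
  exact h2
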